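-- pv_equiv track=rewrite | github.com/MagicMajestic/mysterybox2win | utils/database.py | parse_prize_ids
-- ===== SOURCE A (Python) =====
-- def parse_prize_ids(prize_ids_str, prizes):
--     """Parse prize IDs, including ranges like '1-3'"""
--     result = {}
--     missing = []
--
--     # Split by comma
--     parts = [part.strip() for part in prize_ids_str.split(',')]
--
--     for part in parts:
--         # Check if it's a range (e.g., "1-3")
--         if '-' in part:
--             try:
--                 start, end = map(str.strip, part.split('-'))
--                 # Convert to int only for comparison, then back to string
--                 start_int, end_int = int(start), int(end)
--
--                 # Process each ID in the range
--                 for i in range(start_int, end_int + 1):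
--                     prize_id = str(i)
--                     if prize_id in prizes:
--                         result[prize_id] = prizes[prize_id]
--                     else:
--                         missing.append(prize_id)
--             except ValueError:
--                 # If not valid integers, treat as a regular ID
--                 if part in prizes:
--                     result[part] = prizes[part]
--                 else:
--                     missing.append(part)
--         else:
--             # Regular ID
--             if part in prizes:
--                 result[part] = prizes[part]
--             else:
--                 missing.append(part)
--
--     return result, missing
-- ===== SOURCE B (Python) =====
-- def parse_prize_ids(prize_ids_str, prizes):
--     """Parse prize IDs, including ranges like '1-3'.
--
--     Staged decomposition: first materialise the flat list of all denoted IDs,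
--     then build the found dict and the missing list as two separate
--     comprehensions (partition by membership) instead of one loop that mutates
--     a (result, missing) accumulator pair.
--     """
--     ids = [i for raw in prize_ids_str.split(',') for i in _expand_part(raw.strip())]
--     result = {i: prizes[i] for i in ids if i in prizes}
--     missing = [i for i in ids if i not in prizes]
--     return result, missing
--
--
-- def _expand_part(part):
--     """The list of ID strings one stripped part denotes ([itself] unless a valid range)."""
--     if '-' in part:
--         try:
--             lo, hi = map(int, map(str.strip, part.split('-')))
--         except ValueError:
--             return [part]
--         return [str(i) for i in range(lo, hi + 1)]
--     return [part]
-- ===== Notes on version B (the rewrite author's own statement) =====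
-- stated objective: alternative
-- what changed: Replaces A's single loop with a dual (result, missing) accumulator by a staged pipeline: first materialise the flat list of all denoted IDs (flat-map expansion of parts/ranges), then partition it by membership with two independent comprehensions (a dict comprehension for found IDs and a list filter for missing ones).
import Mathlib
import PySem

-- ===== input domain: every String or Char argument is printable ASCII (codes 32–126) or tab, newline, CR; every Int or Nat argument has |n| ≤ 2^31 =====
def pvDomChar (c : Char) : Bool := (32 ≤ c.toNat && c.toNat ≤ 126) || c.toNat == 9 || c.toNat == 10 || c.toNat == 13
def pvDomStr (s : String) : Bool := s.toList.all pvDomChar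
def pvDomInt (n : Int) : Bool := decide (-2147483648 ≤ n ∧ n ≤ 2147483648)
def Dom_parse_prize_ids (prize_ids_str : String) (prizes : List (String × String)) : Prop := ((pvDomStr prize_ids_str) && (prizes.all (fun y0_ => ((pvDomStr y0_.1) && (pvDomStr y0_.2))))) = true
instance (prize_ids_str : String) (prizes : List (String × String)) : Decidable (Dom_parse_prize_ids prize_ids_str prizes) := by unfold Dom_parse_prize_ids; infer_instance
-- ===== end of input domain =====

-- B replaces A's dual-accumulator loop by a staged pipeline: expand the spec to the flat ID list, then partition it by membership with two comprehensions; same cost, different decomposition.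
-- ===== PORT A =====
def parse_prize_ids (prize_ids_str : String) (prizes : List (String × String)) : (List (String × String)) × List String :=
  let d := PySem.Dict.mk prizes
  let parts := (((PySem.Str.split? prize_ids_str ",").getD [])).map PySem.Str.strip
  let fin := parts.foldl
    (fun st part =>
      if PySem.Str.isIn "-" part then
        match (((PySem.Str.split? part "-").getD [])).map PySem.Str.strip with
        | [start, end_] =>
          match PySem.Int.ofStr? start, PySem.Int.ofStr? end_ with
          | some start_int, some end_int =>
            (PySem.List.pyRange start_int (end_int + 1) 1).foldl
              (fun st i =>
                let prize_id := PySem.Int.toStr i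
                match d.get? prize_id with
                | some v => (st.1.insert prize_id v, st.2)
                | none => (st.1, st.2 ++ [prize_id])) st
          | _, _ =>  -- ValueError from int(): treat as a regular ID
            match d.get? part with
            | some v => (st.1.insert part v, st.2)
            | none => (st.1, st.2 ++ [part])
        | _ =>  -- ValueError from unpacking (≠ 2 pieces): treat as a regular ID
          match d.get? part with
          | some v => (st.1.insert part v, st.2)
          | none => (st.1, st.2 ++ [part])
      else
        match d.get? part with
        | some v => (st.1.insert part v, st.2)
        | none => (st.1, st.2 ++ [part]))
    (PySem.Dict.empty, [])
  (fin.1.items, fin.2)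

-- ===== PORT B =====
-- the list of ID strings one stripped part denotes ([itself] unless a valid range);
-- the lazy `lo, hi = map(int, …)` collapses every ValueError (bad count or bad int) to the literal part
-- the list of ID strings one stripped part denotes ([itself] unless a valid range);
-- the lazy `lo, hi = map(int, …)` collapses every ValueError (bad count or bad int) to the literal part
def pvExpandPart (part : String) : List String :=
  if PySem.Str.isIn "-" part then
    let pieces := ((PySem.Str.split? part "-").getD []).map PySem.Str.strip
    if pieces.length == 2 then
      (PySem.Int.ofStr? (pieces.getD 0 "")).elim [part] (fun lo =>
        (PySem.Int.ofStr? (pieces.getD 1 "")).elim [part] (fun hi =>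
          (PySem.List.pyRange lo (hi + 1) 1).map PySem.Int.toStr))
    else [part]
  else [part]

def parse_prize_ids_alt (prize_ids_str : String) (prizes : List (String × String)) : (List (String × String)) × List String :=
  let d := PySem.Dict.mk prizes
  -- ids = [i for raw in …split(',') for i in _expand_part(raw.strip())]
  let ids := (((PySem.Str.split? prize_ids_str ",").getD [])).flatMap (fun raw => pvExpandPart (PySem.Str.strip raw))
  -- result = {i: prizes[i] for i in ids if i in prizes}
  let result := ids.foldl (fun acc i => (d.get? i).elim acc (fun v => acc.insert i v)) PySem.Dict.empty
  -- missing = [i for i in ids if i not in prizes]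
  (result.items, ids.filter (fun i => (d.get? i).isNone))

-- ===== PRECONDITION & SPEC =====
def Spec_parse_prize_ids (prize_ids_str : String) (prizes : List (String × String)) (out : (List (String × String)) × List String) : Prop := out = parse_prize_ids_alt prize_ids_str prizes
instance (prize_ids_str : String) (prizes : List (String × String)) (out : (List (String × String)) × List String) : Decidable (Spec_parse_prize_ids prize_ids_str prizes out) := by unfold Spec_parse_prize_ids; infer_instance

-- ===== CLAIM =====
def Claim_equal_parse_prize_ids : Prop := ∀ (prize_ids_str : String) (prizes : List (String × String)), Dom_parse_prize_ids prize_ids_str prizes → Spec_parse_prize_ids prize_ids_str prizes (parse_prize_ids prize_ids_str prizes)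

-- ===== LEMMAS AND PROOFS =====
-- A's inline classification block, as a function
def pvStep (d : PySem.Dict String String) (st : PySem.Dict String String × List String) (prize_id : String) : PySem.Dict String String × List String :=
  match d.get? prize_id with
  | some v => (st.1.insert prize_id v, st.2)
  | none => (st.1, st.2 ++ [prize_id])

-- A's per-part action classifies exactly the IDs the part expands to
theorem pvStepA_eq_foldl (d : PySem.Dict String String) (st : PySem.Dict String String × List String) (part : String) :
    (if PySem.Str.isIn "-" part then
      match (((PySem.Str.split? part "-").getD [])).map PySem.Str.strip with
      | [start, end_] =>
        match PySem.Int.ofStr? start, PySem.Int.ofStr? end_ with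
        | some start_int, some end_int =>
          (PySem.List.pyRange start_int (end_int + 1) 1).foldl
            (fun st i => pvStep d st (PySem.Int.toStr i)) st
        | _, _ => pvStep d st part
      | _ => pvStep d st part
    else pvStep d st part)
    = (pvExpandPart part).foldl (pvStep d) st := by
  unfold pvExpandPart
  by_cases h : PySem.Str.isIn "-" part = true
  · simp only [h, if_true]
    generalize hsp : (((PySem.Str.split? part "-").getD [])).map PySem.Str.strip = ps
    cases ps with
    | nil => simp
    | cons a t =>
      cases t with
      | nil => simp
      | cons b t2 =>
        cases t2 with
        | nil =>
          cases hlo : PySem.Int.ofStr? a <;> cases hhi : PySem.Int.ofStr? b <;>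
            simp [hlo, hhi, List.foldl_map]
        | cons c t3 => simp
  · simp only [h, if_false, Bool.false_eq_true, List.foldl_cons, List.foldl_nil]

-- partition lemma: one classify fold over ids = (conditional-insert fold, appended filter of the misses)
theorem pvPartition (d : PySem.Dict String String) (ids : List String) (D : PySem.Dict String String) (M : List String) :
    ids.foldl (pvStep d) (D, M)
    = (ids.foldl (fun acc i => (d.get? i).elim acc (fun v => acc.insert i v)) D,
       M ++ ids.filter (fun i => (d.get? i).isNone)) := by
  induction ids generalizing D M with
  | nil => simp
  | cons x xs ih =>
    simp only [List.foldl_cons, List.filter_cons]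
    cases hx : d.get? x with
    | some v => simp [pvStep, hx, ih]
    | none => simp [pvStep, hx, ih]

theorem pv_main (prize_ids_str : String) (prizes : List (String × String)) :
    parse_prize_ids prize_ids_str prizes = parse_prize_ids_alt prize_ids_str prizes := by
  unfold parse_prize_ids parse_prize_ids_alt
  have h : ∀ (d : PySem.Dict String String) (l : List String) (st : PySem.Dict String String × List String),
      (l.map PySem.Str.strip).foldl
        (fun st part =>
          if PySem.Str.isIn "-" part then
            match (((PySem.Str.split? part "-").getD [])).map PySem.Str.strip with
            | [start, end_] =>
              match PySem.Int.ofStr? start, PySem.Int.ofStr? end_ with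
              | some start_int, some end_int =>
                (PySem.List.pyRange start_int (end_int + 1) 1).foldl
                  (fun st i => pvStep d st (PySem.Int.toStr i)) st
              | _, _ => pvStep d st part
            | _ => pvStep d st part
          else pvStep d st part) st
      = (l.flatMap (fun raw => pvExpandPart (PySem.Str.strip raw))).foldl (pvStep d) st := by
    intro d l
    induction l with
    | nil => intro st; rfl
    | cons x xs ih =>
      intro st
      simp only [List.map_cons, List.foldl_cons, List.flatMap_cons, List.foldl_append]
      rw [pvStepA_eq_foldl d st (PySem.Str.strip x)]
      exact ih _
  have h2 := h (PySem.Dict.mk prizes) ((PySem.Str.split? prize_ids_str ",").getD []) (PySem.Dict.empty, [])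
  simp only [pvStep] at h2
  refine (congrArg (fun fin => (fin.1.items, fin.2)) h2).trans ?_
  rw [pvPartition]
  simp only [List.nil_append]

-- ===== VERDICT =====
theorem parse_prize_ids_spec : Claim_equal_parse_prize_ids := by
  intro s prizes _
  unfold Spec_parse_prize_ids
  exact pv_main s prizes
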